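-- pv_equiv track=rewrite | github.com/Timosbonus/AdventOfCode | 2024/DayNine.py | removeDots
-- ===== SOURCE A (Python) =====
-- def removeDots(s):
--     lastIndex = len(s) - 1
--     firstIndex = 0
--     while firstIndex <= lastIndex:
--         while firstIndex <= lastIndex and s[lastIndex] == ".":
--             lastIndex -= 1
--
--         while firstIndex <= lastIndex and s[firstIndex] != ".":
--             firstIndex += 1
--
--         if firstIndex <= lastIndex:
--             s[firstIndex],s[lastIndex] = s[lastIndex], s[firstIndex]
--
--     return s
-- ===== SOURCE B (Python) =====
-- def removeDots(s):
--     # One counting pass + one build pass; mutates s in place (s[:] = ...) like A and returns it.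
--     n = len(s)
--     k = sum(1 for x in s if x != ".")
--     pool = [x for x in s[k:] if x != "."]
--     res = []
--     for x in s[:k]:
--         if x != ".":
--             res.append(x)
--         else:
--             res.append(pool.pop())
--     s[:] = res + ["."] * (n - k)
--     return s
-- ===== Notes on version B (the rewrite author's own statement) =====
-- stated objective: alternative
-- what changed: A compacts by repeatedly scanning two pointers inward and swapping the leftmost dot with the rightmost non-dot in place; B instead counts the non-dots (k), builds a pool of the non-dots lying past index k, and in a single left-to-right pass over the first k slots keeps non-dots and fills each dot by popping the pool from the right, padding the tail with dots.
import Mathlib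
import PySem

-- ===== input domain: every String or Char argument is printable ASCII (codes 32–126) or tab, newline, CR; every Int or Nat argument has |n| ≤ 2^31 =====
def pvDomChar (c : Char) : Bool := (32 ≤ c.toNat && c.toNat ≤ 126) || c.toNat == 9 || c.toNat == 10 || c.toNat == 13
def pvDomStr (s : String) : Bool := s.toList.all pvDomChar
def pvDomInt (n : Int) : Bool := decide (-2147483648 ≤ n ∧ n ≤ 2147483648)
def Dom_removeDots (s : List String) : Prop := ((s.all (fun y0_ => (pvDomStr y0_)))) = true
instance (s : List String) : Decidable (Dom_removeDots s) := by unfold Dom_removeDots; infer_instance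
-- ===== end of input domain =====

-- B replaces A's in-place two-pointer swapping loop by a counting pass plus one build pass
-- (keep non-dots in the first k slots, fill holes by popping a right-to-left pool, pad with dots);
-- both Pythons mutate the argument list in place the same way, and the equivalence proved here is
-- about the return value.


-- ===== PORT A =====
-- termination helpers for the ports' while-loops (cited by name in decreasing_by)
theorem skip_decR (fi li : Int) (h : fi ≤ li) : (li - 1 - fi + 1).toNat < (li - fi + 1).toNat := by
  omega

theorem skip_decL (fi li : Int) (h : fi ≤ li) : (li - (fi + 1) + 1).toNat < (li - fi + 1).toNat := by
  omega

def skipR (s : List String) (fi li : Int) : Int :=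
  if fi ≤ li ∧ PySem.List.pyGetD s li "." == "." then skipR s fi (li - 1) else li
termination_by (li - fi + 1).toNat
decreasing_by exact skip_decR fi li (by rename_i h; exact h.1)

def skipL (s : List String) (fi li : Int) : Int :=
  if fi ≤ li ∧ ¬(PySem.List.pyGetD s fi "." == ".") then skipL s (fi + 1) li else fi
termination_by (li - fi + 1).toNat
decreasing_by exact skip_decL fi li (by rename_i h; exact h.1)

lemma skipR_le (s : List String) (fi li : Int) : skipR s fi li ≤ li := by
  fun_induction skipR s fi li with
  | case1 li hc ih => omega
  | case2 li hc => omega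

lemma skipL_ge (s : List String) (fi li : Int) : fi ≤ skipL s fi li := by
  fun_induction skipL s fi li with
  | case1 fi hc ih => omega
  | case2 fi hc => omega

lemma skipR_stop' (s : List String) (fi li : Int) (h : fi ≤ li) (he : skipR s fi li = li) :
    ¬ (PySem.List.pyGetD s li "." = ".") := by
  intro hd
  have h1 : skipR s fi li = skipR s fi (li - 1) := by
    rw [skipR]; simp [h, hd]
  have h2 := skipR_le s fi (li - 1)
  omega

lemma skipL_stop (s : List String) (fi li : Int) (h : skipL s fi li ≤ li) :
    PySem.List.pyGetD s (skipL s fi li) "." = "." := by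
  fun_induction skipL s fi li with
  | case1 fi hc ih => exact ih h
  | case2 fi hc =>
    by_contra hd
    exact hc ⟨h, by simpa using hd⟩

lemma getD_setD_self (t : List String) (i : Int) (v d : String) :
    PySem.List.pyGetD (PySem.List.pySetD t i v) i d
      = if PySem.Raise.InRange t.length i then v else d := by
  simp only [PySem.List.pyGetD, PySem.List.pySetD, PySem.List.pyGet?, PySem.List.pySet?,
    PySem.List.pyIdx?, PySem.Raise.InRange]
  split_ifs with h1 h2 h3 <;>
    simp_all [List.getElem?_set, List.length_set] <;>
    first
      | omega
      | (split_ifs with hh <;> simp_all <;> omega)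

theorem loopA_dec (s : List String) (fi li : Int) (h : fi ≤ li)
    (hle : skipL s fi (skipR s fi li) ≤ skipR s fi li) :
    2 * (skipR s fi li - skipL s fi (skipR s fi li) + 1).toNat +
      (if PySem.List.pyGetD
            (PySem.List.pySetD
              (PySem.List.pySetD s (skipL s fi (skipR s fi li))
                (PySem.List.pyGetD s (skipR s fi li) "."))
              (skipR s fi li)
              (PySem.List.pyGetD s (skipL s fi (skipR s fi li)) "."))
            (skipR s fi li) "." = "." then 0 else 1)
      < 2 * (li - fi + 1).toNat + (if PySem.List.pyGetD s li "." = "." then 0 else 1) := by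
  set L := skipR s fi li with eL
  set F := skipL s fi L with eF
  have hR : L ≤ li := skipR_le s fi li
  have hLg : fi ≤ F := skipL_ge s fi L
  have hdotf : PySem.List.pyGetD s F "." = "." := skipL_stop s fi L hle
  have hnew : PySem.List.pyGetD
      (PySem.List.pySetD (PySem.List.pySetD s F (PySem.List.pyGetD s L "."))
        L (PySem.List.pyGetD s F ".")) L "." = "." := by
    rw [hdotf, getD_setD_self]
    split_ifs <;> rfl
  rw [hnew, if_pos rfl]
  by_cases hsame : L = li ∧ F = fi
  · obtain ⟨e1, e2⟩ := hsame
    have hstop := skipR_stop' s fi li h e1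
    rw [if_neg hstop]
    omega
  · rcases (not_and_or.mp hsame) with h1 | h2
    · have : L < li := lt_of_le_of_ne hR h1
      split_ifs <;> omega
    · have : fi < F := lt_of_le_of_ne hLg (Ne.symm h2)
      split_ifs <;> omega

def loopA (s : List String) (fi li : Int) : List String :=
  if fi ≤ li then
    if skipL s fi (skipR s fi li) ≤ skipR s fi li then
      loopA (PySem.List.pySetD
               (PySem.List.pySetD s (skipL s fi (skipR s fi li))
                 (PySem.List.pyGetD s (skipR s fi li) "."))
               (skipR s fi li)
               (PySem.List.pyGetD s (skipL s fi (skipR s fi li)) "."))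
            (skipL s fi (skipR s fi li)) (skipR s fi li)
    else s
  else s
termination_by 2 * (li - fi + 1).toNat + (if PySem.List.pyGetD s li "." = "." then 0 else 1)
decreasing_by rename_i h hle; exact loopA_dec s fi li h hle

def removeDots (s : List String) : List String :=
  loopA s 0 ((s.length : Int) - 1)

-- ===== PORT B =====
def fillDots : List String → List String → List String
  | [], _ => []
  | x :: xs, pool =>
    if x != "." then
      x :: fillDots xs pool
    else
      match pool.getLast? with
      | some v => v :: fillDots xs pool.dropLast
      | none => "." :: fillDots xs []

def removeDots_alt (s : List String) : List String :=
  fillDots (s.take (s.countP (fun x => x != ".")))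
      ((s.drop (s.countP (fun x => x != "."))).filter (fun x => x != "."))
    ++ List.replicate (s.length - s.countP (fun x => x != ".")) "."

-- ===== PRECONDITION & SPEC =====
def Spec_removeDots (s : List String) (out : List String) : Prop := out = removeDots_alt s
instance (s : List String) (out : List String) : Decidable (Spec_removeDots s out) := by unfold Spec_removeDots; infer_instance

-- ===== CLAIM =====
def Claim_equal_removeDots : Prop := ∀ (s : List String), Dom_removeDots s → Spec_removeDots s (removeDots s)

-- ===== LEMMAS AND PROOFS =====
lemma fillDots_append (a r p : List String) (ha : ∀ x ∈ a, x ≠ ".") :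
    fillDots (a ++ r) p = a ++ fillDots r p := by
  induction a with
  | nil => simp
  | cons x xs ih =>
    have hx : x ≠ "." := ha x (by simp)
    simp only [List.cons_append, fillDots]
    simp [hx, ih (fun y hy => ha y (by simp [hy]))]

lemma fillDots_dot_concat (r p : List String) (v : String) :
    fillDots ("." :: r) (p ++ [v]) = v :: fillDots r p := by
  simp [fillDots]

lemma countP_eq_len (a : List String) (ha : ∀ x ∈ a, x ≠ ".") :
    a.countP (fun x => x != ".") = a.length := by
  rw [List.countP_eq_length]
  intro x hx; simpa using ha x hx

lemma countP_eq_zero' (c : List String) (hc : ∀ x ∈ c, x = ".") :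
    c.countP (fun x => x != ".") = 0 := by
  rw [List.countP_eq_zero]
  intro x hx; simpa using hc x hx

lemma filter_dots (c : List String) (hc : ∀ x ∈ c, x = ".") :
    c.filter (fun x => x != ".") = [] := by
  rw [List.filter_eq_nil_iff]
  intro x hx; simpa using hc x hx

lemma altOut_id (a c : List String) (ha : ∀ x ∈ a, x ≠ ".") (hc : ∀ x ∈ c, x = ".") :
    removeDots_alt (a ++ c) = a ++ c := by
  have hk : (a ++ c).countP (fun x => x != ".") = a.length := by
    simp [List.countP_append, countP_eq_len a ha, countP_eq_zero' c hc]
  rw [removeDots_alt, hk]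
  rw [List.take_left, List.drop_left, filter_dots c hc]
  have h1 : fillDots a [] = a := by
    simpa [fillDots] using fillDots_append a [] [] ha
  rw [h1]
  have h2 : List.replicate ((a ++ c).length - a.length) "." = c := by
    simp only [List.length_append, Nat.add_sub_cancel_left]
    exact (List.eq_replicate_of_mem hc).symm
  rw [h2]

lemma altOut_swap (a b c : List String) (v : String) (hv : v ≠ ".")
    (ha : ∀ x ∈ a, x ≠ ".") (hc : ∀ x ∈ c, x = ".") :
    removeDots_alt (a ++ v :: b ++ "." :: c) = removeDots_alt (a ++ "." :: b ++ v :: c) := by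
  have hvb : (v != ".") = true := by simpa using hv
  have hj := List.countP_le_length (p := fun x : String => x != ".") (l := b)
  have hkL : (a ++ v :: b ++ "." :: c).countP (fun x => x != ".")
      = a.length + (b.countP (fun x => x != ".") + 1) := by
    simp [List.countP_append, countP_eq_len a ha, countP_eq_zero' c hc, hvb]
  have hkR : (a ++ "." :: b ++ v :: c).countP (fun x => x != ".")
      = a.length + (b.countP (fun x => x != ".") + 1) := by
    simp [List.countP_append, countP_eq_len a ha, countP_eq_zero' c hc, hvb]
  have hlen : (a ++ v :: b ++ "." :: c).length = (a ++ "." :: b ++ v :: c).length := by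
    simp
  rw [removeDots_alt, removeDots_alt, hkL, hkR, hlen]
  set j := b.countP (fun x => x != ".") with hjdef
  have tL : (a ++ v :: b ++ "." :: c).take (a.length + (j + 1)) = a ++ v :: b.take j := by
    rw [List.append_assoc, List.take_append]
    simp [List.take_cons, List.take_append_of_le_length hj]
  have tR : (a ++ "." :: b ++ v :: c).take (a.length + (j + 1)) = a ++ "." :: b.take j := by
    rw [List.append_assoc, List.take_append]
    simp [List.take_cons, List.take_append_of_le_length hj]
  have dL : (a ++ v :: b ++ "." :: c).drop (a.length + (j + 1)) = b.drop j ++ "." :: c := by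
    rw [List.append_assoc, List.drop_append]
    simp [List.drop_append_of_le_length hj]
  have dR : (a ++ "." :: b ++ v :: c).drop (a.length + (j + 1)) = b.drop j ++ v :: c := by
    rw [List.append_assoc, List.drop_append]
    simp [List.drop_append_of_le_length hj]
  rw [tL, tR, dL, dR]
  have pL : (b.drop j ++ "." :: c).filter (fun x => x != ".")
      = (b.drop j).filter (fun x => x != ".") := by
    simp [List.filter_append, filter_dots c hc]
  have pR : (b.drop j ++ v :: c).filter (fun x => x != ".")
      = (b.drop j).filter (fun x => x != ".") ++ [v] := by
    simp [List.filter_append, hvb, filter_dots c hc]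
  rw [pL, pR]
  have fL : fillDots (a ++ v :: b.take j) ((b.drop j).filter (fun x => x != "."))
      = a ++ v :: fillDots (b.take j) ((b.drop j).filter (fun x => x != ".")) := by
    rw [fillDots_append a _ _ ha]
    simp [fillDots, hvb]
  have fR : fillDots (a ++ "." :: b.take j) ((b.drop j).filter (fun x => x != ".") ++ [v])
      = a ++ v :: fillDots (b.take j) ((b.drop j).filter (fun x => x != ".")) := by
    rw [fillDots_append a _ _ ha, fillDots_dot_concat]
  rw [fL, fR]

lemma getD_nat (s : List String) (i : Nat) (h : i < s.length) :
    PySem.List.pyGetD s (i : Int) "." = s[i] := by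
  simp [PySem.List.pyGetD_natCast, List.getD_eq_getElem?_getD, h]

lemma getD_int (s : List String) (i : Int) (h0 : 0 ≤ i) (h : i.toNat < s.length) :
    PySem.List.pyGetD s i "." = s[i.toNat] := by
  obtain ⟨n, rfl⟩ := Int.eq_ofNat_of_zero_le h0
  simpa using getD_nat s n (by simpa using h)

lemma getD_setD_ne (t : List String) (i j : Int) (v d : String)
    (hi : 0 ≤ i) (hj : 0 ≤ j) (hne : i ≠ j) :
    PySem.List.pyGetD (PySem.List.pySetD t i v) j d = PySem.List.pyGetD t j d := by
  simp only [PySem.List.pyGetD, PySem.List.pySetD, PySem.List.pyGet?, PySem.List.pySet?,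
    PySem.List.pyIdx?]
  split_ifs with h1 h2 h3 <;>
    simp_all [List.getElem?_set, List.length_set] <;>
    first
      | omega
      | (split_ifs with hh <;> simp_all <;> omega)

lemma split_two (s : List String) (p q : Nat) (hpq : p < q) (hq : q < s.length) :
    s = s.take p ++ s[p]'(by omega) :: ((s.drop (p+1)).take (q - p - 1) ++ s[q] :: s.drop (q+1)) := by
  conv_lhs => rw [← List.take_append_drop p s]
  congr 1
  rw [List.drop_eq_getElem_cons (by omega)]
  congr 1
  conv_lhs => rw [← List.take_append_drop (q - p - 1) (s.drop (p+1))]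
  congr 1
  rw [List.drop_drop]
  have hh : p + 1 + (q - p - 1) = q := by omega
  rw [hh, List.drop_eq_getElem_cons (by omega)]

lemma set_two (s : List String) (p q : Nat) (v w : String) (hpq : p < q) (hq : q < s.length) :
    (s.set p v).set q w
      = s.take p ++ v :: ((s.drop (p+1)).take (q - p - 1) ++ w :: s.drop (q+1)) := by
  have hlen : (s.take p).length = p := by simp only [List.length_take]; omega
  rw [List.set_eq_take_cons_drop v (by omega : p < s.length)]
  rw [List.set_eq_take_cons_drop w
    (by simp only [List.length_append, List.length_cons, List.length_take, List.length_drop]; omega :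
      q < (s.take p ++ v :: s.drop (p+1)).length)]
  have e1 : (s.take p ++ v :: s.drop (p+1)).take q
      = s.take p ++ v :: (s.drop (p+1)).take (q - p - 1) := by
    rw [List.take_append, hlen, List.take_of_length_le (by omega : (s.take p).length ≤ q)]
    congr 1
    rw [show q - p = (q - p - 1) + 1 by omega, List.take_succ_cons]
    simp
  have e2 : (s.take p ++ v :: s.drop (p+1)).drop (q+1) = s.drop (q+1) := by
    rw [List.drop_append, hlen, List.drop_eq_nil_of_le (by omega : (s.take p).length ≤ q + 1)]
    rw [show q + 1 - p = (q - p) + 1 by omega, List.drop_succ_cons, List.drop_drop]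
    rw [show p + 1 + (q - p) = q + 1 by omega]
    simp
  rw [e1, e2]
  simp

lemma skipR_ge (s : List String) (fi li : Int) (h : fi ≤ li + 1) : fi - 1 ≤ skipR s fi li := by
  fun_induction skipR s fi li with
  | case1 li hc ih => exact ih (by omega)
  | case2 li hc => omega

lemma skipL_le (s : List String) (fi li : Int) (h : fi ≤ li + 1) : skipL s fi li ≤ li + 1 := by
  fun_induction skipL s fi li with
  | case1 fi hc ih => exact ih (by omega)
  | case2 fi hc => omega

lemma skipR_spec (s : List String) (fi li : Int) :
    skipR s fi li < fi ∨ ¬ (PySem.List.pyGetD s (skipR s fi li) "." = ".") := by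
  fun_induction skipR s fi li with
  | case1 li hc ih => exact ih
  | case2 li hc =>
    by_cases h : fi ≤ li
    · right; intro hd
      exact hc ⟨h, by simpa using hd⟩
    · left; omega

lemma skipR_dots (s : List String) (fi li : Int) (j : Int) (h1 : skipR s fi li < j) (h2 : j ≤ li) :
    PySem.List.pyGetD s j "." = "." := by
  fun_induction skipR s fi li with
  | case1 li hc ih =>
    rcases Int.lt_or_le (li - 1) j with hj | hj
    · have : j = li := by omega
      subst this
      exact eq_of_beq hc.2
    · exact ih h1 hj
  | case2 li hc => omega

lemma skipL_nondots (s : List String) (fi li : Int) (j : Int) (h1 : fi ≤ j) (h2 : j < skipL s fi li) :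
    ¬ (PySem.List.pyGetD s j "." = ".") := by
  fun_induction skipL s fi li with
  | case1 fi hc ih =>
    rcases Int.lt_or_le j (fi + 1) with hj | hj
    · have : j = fi := by omega
      subst this
      intro hd; exact hc.2 (by simpa using hd)
    · exact ih hj h2
  | case2 fi hc => omega

lemma mem_take_nd (s : List String) (m : Int) (hm : 0 ≤ m)
    (h : ∀ j : Int, 0 ≤ j → j < m → ¬ (PySem.List.pyGetD s j "." = ".")) :
    ∀ x ∈ s.take m.toNat, x ≠ "." := by
  intro x hx
  obtain ⟨i, hi, rfl⟩ := List.getElem_of_mem hx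
  have hi' : i < s.length := by simp at hi; omega
  rw [List.getElem_take]
  intro hd
  exact h i (by omega) (by simp at hi; omega) (by rw [getD_nat s i hi']; exact hd)

lemma mem_drop_dot (s : List String) (n : Nat)
    (h : ∀ j : Int, (n : Int) ≤ j → j < (s.length : Int) → PySem.List.pyGetD s j "." = ".") :
    ∀ x ∈ s.drop n, x = "." := by
  intro x hx
  obtain ⟨i, hi, rfl⟩ := List.getElem_of_mem hx
  rw [List.getElem_drop]
  have hlen : n + i < s.length := by simp at hi; omega
  rw [← getD_nat s (n + i) hlen]
  exact h (n + i) (by push_cast; omega) (by push_cast; omega)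

lemma compacted_eq (s : List String) (m : Int) (h0 : 0 ≤ m) (hm : m ≤ (s.length : Int))
    (hpre : ∀ j : Int, 0 ≤ j → j < m → ¬ (PySem.List.pyGetD s j "." = "."))
    (hsuf : ∀ j : Int, m ≤ j → j < (s.length : Int) → PySem.List.pyGetD s j "." = ".") :
    removeDots_alt s = s := by
  have ha := mem_take_nd s m h0 hpre
  have hc := mem_drop_dot s m.toNat (by intro j hj hlen; exact hsuf j (by omega) hlen)
  have := altOut_id (s.take m.toNat) (s.drop m.toNat) ha hc
  rwa [List.take_append_drop] at this

lemma main_ind (s : List String) (fi li : Int) :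
    0 ≤ fi → li < (s.length : Int) → fi ≤ li + 1 →
    (∀ j : Int, 0 ≤ j → j < fi → ¬ (PySem.List.pyGetD s j "." = ".")) →
    (∀ j : Int, li < j → j < (s.length : Int) → PySem.List.pyGetD s j "." = ".") →
    loopA s fi li = removeDots_alt s := by
  fun_induction loopA s fi li with
  | case1 s fi li hcond hle ih =>
    intro h0 h1 h2 hpre hsuf
    set L := skipR s fi li with eL
    set F := skipL s fi L with eF
    have hR : L ≤ li := skipR_le s fi li
    have hRg : fi - 1 ≤ L := skipR_ge s fi li (by omega)
    have hLg : fi ≤ F := skipL_ge s fi L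
    have hF0 : (0 : Int) ≤ F := by omega
    have hdotF : PySem.List.pyGetD s F "." = "." := skipL_stop s fi L hle
    have hndL : ¬ (PySem.List.pyGetD s L "." = ".") := by
      rcases skipR_spec s fi li with hcl | hcl
      · omega
      · exact hcl
    have hFL : F < L := by
      rcases lt_or_eq_of_le hle with hx | hx
      · exact hx
      · exact absurd (hx ▸ hdotF) hndL
    have hp : ((F.toNat : Nat) : Int) = F := Int.toNat_of_nonneg hF0
    have hq : ((L.toNat : Nat) : Int) = L := Int.toNat_of_nonneg (by omega)
    have hpq : F.toNat < L.toNat := by omega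
    have hqlen : L.toNat < s.length := by omega
    have hplen : F.toNat < s.length := by omega
    have hgF : PySem.List.pyGetD s F "." = s[F.toNat]'hplen := getD_int s F hF0 hplen
    have hgL : PySem.List.pyGetD s L "." = s[L.toNat]'hqlen := getD_int s L (by omega) hqlen
    have hsp : s[F.toNat]'hplen = "." := by rw [← hgF]; exact hdotF
    have hv : s[L.toNat]'hqlen ≠ "." := by rw [← hgL]; exact hndL
    have hallpre : ∀ j : Int, 0 ≤ j → j < F → ¬ (PySem.List.pyGetD s j "." = ".") := by
      intro j hj hjF
      rcases Int.lt_or_le j fi with hcl | hcl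
      · exact hpre j hj hcl
      · exact skipL_nondots s fi L j hcl hjF
    have hallsuf : ∀ j : Int, L < j → j < (s.length : Int) → PySem.List.pyGetD s j "." = "." := by
      intro j hjL hjlen
      rcases Int.lt_or_le li j with hcl | hcl
      · exact hsuf j hcl hjlen
      · exact skipR_dots s fi li j (by omega) hcl
    have hs' : PySem.List.pySetD (PySem.List.pySetD s F (PySem.List.pyGetD s L "."))
        L (PySem.List.pyGetD s F ".")
        = (s.set F.toNat (s[L.toNat]'hqlen)).set L.toNat "." := by
      rw [hgL, hdotF, PySem.List.pySetD_of_nonneg s _ hF0,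
        PySem.List.pySetD_of_nonneg _ _ (by omega : (0:Int) ≤ L)]
    have hset := set_two s F.toNat L.toNat (s[L.toNat]'hqlen) "." hpq hqlen
    have hsplit := split_two s F.toNat L.toNat hpq hqlen
    rw [hsp] at hsplit
    have hlen2 : ((PySem.List.pySetD (PySem.List.pySetD s F (PySem.List.pyGetD s L "."))
        L (PySem.List.pyGetD s F ".")).length : Int) = (s.length : Int) := by
      rw [hs']; simp
    have hagree : ∀ j : Int, 0 ≤ j → j ≠ F → j ≠ L →
        PySem.List.pyGetD (PySem.List.pySetD (PySem.List.pySetD s F (PySem.List.pyGetD s L "."))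
          L (PySem.List.pyGetD s F ".")) j "." = PySem.List.pyGetD s j "." := by
      intro j hj hjF hjL
      rw [getD_setD_ne _ L j _ _ (by omega) hj (fun hx => hjL hx.symm),
          getD_setD_ne _ F j _ _ hF0 hj (fun hx => hjF hx.symm)]
    rw [ih hF0 (by omega) (by omega)
        (by intro j hj hjF
            rw [hagree j hj (by omega) (by omega)]
            exact hallpre j hj hjF)
        (by intro j hjL hjlen
            rw [hagree j (by omega) (by omega) (by omega)]
            exact hallsuf j hjL (by omega))]
    rw [hs', hset]
    conv_rhs => rw [hsplit]
    simpa [List.append_assoc] using altOut_swap (s.take F.toNat)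
      ((s.drop (F.toNat + 1)).take (L.toNat - F.toNat - 1)) (s.drop (L.toNat + 1))
      (s[L.toNat]'hqlen) hv
      (mem_take_nd s F hF0 hallpre)
      (mem_drop_dot s (L.toNat + 1) (by
        intro j hj hjlen
        exact hallsuf j (by omega) hjlen))
  | case2 s fi li hcond hle =>
    intro h0 h1 h2 hpre hsuf
    set L := skipR s fi li with eL
    set F := skipL s fi L with eF
    have hR : L ≤ li := skipR_le s fi li
    have hRg : fi - 1 ≤ L := skipR_ge s fi li (by omega)
    have hLg : fi ≤ F := skipL_ge s fi L
    have hLe : F ≤ L + 1 := skipL_le s fi L (by omega)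
    refine (compacted_eq s F (by omega) (by omega) ?_ ?_).symm
    · intro j hj hjF
      rcases Int.lt_or_le j fi with hc | hc
      · exact hpre j hj hc
      · exact skipL_nondots s fi L j hc hjF
    · intro j hjF hjlen
      rcases Int.lt_or_le li j with hc | hc
      · exact hsuf j hc hjlen
      · exact skipR_dots s fi li j (by omega) hc
  | case3 s fi li hcond =>
    intro h0 h1 h2 hpre hsuf
    refine (compacted_eq s fi h0 (by omega) hpre ?_).symm
    intro j hj hjlen
    exact hsuf j (by omega) hjlen

-- ===== VERDICT =====
theorem removeDots_spec : Claim_equal_removeDots := by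
  unfold Claim_equal_removeDots
  intro s _
  unfold Spec_removeDots removeDots
  exact main_ind s 0 ((s.length : Int) - 1) (by omega) (by omega) (by omega)
    (fun j hj hjlt => absurd hjlt (by omega))
    (fun j hjl hjlen => absurd hjlen (by omega))
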